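-- pv_equiv track=rewrite | github.com/borisovvilyaa/CIDS | task4/max_series_length.py | max_series_length_test
-- ===== SOURCE A (Python) =====
-- def max_series_length_test(sequence) -> bool:
--     """
--     Performs the maximum series length test on a given sequence of bits.
--
--     @param sequence: The sequence of bits to test.
--     @return: True if the sequence meets the randomness criteria, False otherwise.
--     """
--     max_zero_series = 0  # Maximum length of zero series
--     max_one_series = 0  # Maximum length of one series
--
--     zero_series = 0  # Current length of zero series
--     one_series = 0  # Current length of one series
--
--     for bit in sequence:
--         if bit == '0':
--             # Increase the length of zero series
--             zero_series += 1
--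
--             # Update the maximum length of zero series if the current length is greater
--             if zero_series > max_zero_series:
--                 max_zero_series = zero_series
--
--             # Reset the counter for one series
--             one_series = 0
--         else:
--             # Increase the length of one series
--             one_series += 1
--
--             # Update the maximum length of one series if the current length is greater
--             if one_series > max_one_series:
--                 max_one_series = one_series
--
--             # Reset the counter for zero series
--             zero_series = 0
--
--     # Compare with the maximum allowed series length (36 bits)
--     if max_zero_series > 36 or max_one_series > 36:
--         return False  # The sequence does not meet the randomness criteria
--     else:
--         return True  # The sequence meets the randomness criteria
-- ===== SOURCE B (Python) =====
-- def max_series_length_test(sequence) -> bool: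
--     """Sliding-window check: the sequence fails iff some window of 37
--     consecutive bits is constant under the key (bit == '0'), i.e. some run
--     of equal-keyed bits is longer than 36."""
--     seq = list(sequence)
--     n = len(seq)
--     return not any(
--         all((seq[i + j] == '0') == (seq[i] == '0') for j in range(1, 37))
--         for i in range(n - 36)
--     )
-- ===== Notes on version B (the rewrite author's own statement) =====
-- stated objective: alternative
-- what changed: A does a single-pass run-length scan with two counters and two running maxima; B instead checks every window of 37 consecutive positions and fails iff some window is constant under the key (bit == '0'), which holds iff some run exceeds 36.
import Mathlib
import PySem

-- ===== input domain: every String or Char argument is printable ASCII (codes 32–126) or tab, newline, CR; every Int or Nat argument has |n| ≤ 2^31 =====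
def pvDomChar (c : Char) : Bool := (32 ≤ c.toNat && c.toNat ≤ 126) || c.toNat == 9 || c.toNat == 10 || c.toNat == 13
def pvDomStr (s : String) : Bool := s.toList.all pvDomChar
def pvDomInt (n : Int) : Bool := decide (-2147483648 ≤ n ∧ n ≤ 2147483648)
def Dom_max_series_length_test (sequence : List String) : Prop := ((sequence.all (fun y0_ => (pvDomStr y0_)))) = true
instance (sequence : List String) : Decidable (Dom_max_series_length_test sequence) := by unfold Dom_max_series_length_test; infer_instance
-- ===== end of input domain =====

-- B replaces A's run-length scan (two counters, two running maxima) by a sliding-window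
-- check: fail iff some window of 37 consecutive bits is constant under the key (bit == '0')
-- (objective: alternative; same linear cost up to the constant window factor).

-- ===== PORT A =====
-- A's loop body: state (max_zero_series, max_one_series, zero_series, one_series)
def pvStepA (st : Int × Int × Int × Int) (bit : String) : Int × Int × Int × Int :=
  match st with
  | (mz, mo, z, o) =>
    if bit == "0" then
      let z' := z + 1
      let mz' := if z' > mz then z' else mz
      (mz', mo, z', 0)
    else
      let o' := o + 1
      let mo' := if o' > mo then o' else mo
      (mz, mo', 0, o')

def max_series_length_test (sequence : List String) : Bool :=
  let r := sequence.foldl pvStepA (0, 0, 0, 0)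
  if r.1 > 36 || r.2.1 > 36 then false else true

-- ===== PORT B =====
-- Source B: not any(all((seq[i+j]=='0')==(seq[i]=='0') for j in range(1,37)) for i in range(n-36))
def max_series_length_test_alt (sequence : List String) : Bool :=
  let n := sequence.length
  !((List.range (n - 36)).any (fun i =>
      (List.range' 1 36).all (fun j =>
        ((sequence.getD (i + j) "" == "0") == (sequence.getD i "" == "0")))))

-- ===== PRECONDITION & SPEC =====
def Spec_max_series_length_test (sequence : List String) (out : Bool) : Prop := out = max_series_length_test_alt sequence
instance (sequence : List String) (out : Bool) : Decidable (Spec_max_series_length_test sequence out) := by unfold Spec_max_series_length_test; infer_instance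

-- ===== CLAIM (what is proved, stated in full; the proofs are below) =====
def Claim_equal_max_series_length_test : Prop := ∀ (sequence : List String), Dom_max_series_length_test sequence → Spec_max_series_length_test sequence (max_series_length_test sequence)

-- ===== LEMMAS AND PROOFS =====

-- run-length scan used as a proof intermediary between A's fold and B's windows
def pvAltGo (prev : Option Bool) (run : Int) : List String → Bool
  | [] => decide (run ≤ 36)
  | bit :: rest =>
    let k := (bit == "0")
    if prev == some k then pvAltGo prev (run + 1) rest
    else if run > 36 then false
    else pvAltGo (some k) 1 rest

-- relation between the scan state (prev, run) and A's state (mz, mo, z, o)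
def pvInv (prev : Option Bool) (run mz mo z o : Int) : Prop :=
  0 ≤ mz ∧ 0 ≤ mo ∧
  (match prev with
   | none => run = 0 ∧ z = 0 ∧ o = 0
   | some true => z = run ∧ o = 0 ∧ 1 ≤ run ∧ run ≤ mz
   | some false => o = run ∧ z = 0 ∧ 1 ≤ run ∧ run ≤ mo)

-- once the current run is too long, the scan is false whatever follows
theorem pvAltGo_big (l : List String) : ∀ (prev : Option Bool) (run : Int),
    36 < run → pvAltGo prev run l = false := by
  induction l with
  | nil => intro prev run h; simp [pvAltGo]; omega
  | cons bit rest ih =>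
    intro prev run h
    simp only [pvAltGo]
    by_cases hp : prev == some (bit == "0")
    · simp [hp]; exact ih _ _ (by omega)
    · simp [hp]; intro h2; omega

-- A's maxima never decrease along the fold
theorem pvMono (l : List String) : ∀ (mz mo z o : Int),
    mz ≤ (List.foldl pvStepA (mz, mo, z, o) l).1 ∧
    mo ≤ (List.foldl pvStepA (mz, mo, z, o) l).2.1 := by
  induction l with
  | nil => intro mz mo z o; simp
  | cons bit rest ih =>
    intro mz mo z o
    simp only [List.foldl_cons, pvStepA]
    by_cases hb : bit == "0" <;> simp [hb] <;> split_ifs with h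
    · exact ⟨le_trans (by omega) (ih _ mo _ 0).1, (ih _ mo _ 0).2⟩
    · exact ih mz mo _ 0
    · exact ⟨(ih mz _ 0 _).1, le_trans (by omega) (ih mz _ 0 _).2⟩
    · exact ih mz mo 0 _

-- main invariant lemma: A's final check equals the scan's continuation, given pvInv
theorem pvMain (l : List String) : ∀ (prev : Option Bool) (run mz mo z o : Int),
    pvInv prev run mz mo z o →
    (if (List.foldl pvStepA (mz, mo, z, o) l).1 > 36 ||
        (List.foldl pvStepA (mz, mo, z, o) l).2.1 > 36 then false else true)
      = (decide (mz ≤ 36) && decide (mo ≤ 36) && pvAltGo prev run l) := by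
  induction l with
  | nil =>
    intro prev run mz mo z o hinv
    obtain ⟨hmz, hmo, hrest⟩ := hinv
    simp only [List.foldl_nil, pvAltGo]
    match prev with
    | none =>
      obtain ⟨h1, _, _⟩ := hrest
      rw [Bool.eq_iff_iff]; simp; omega
    | some true =>
      obtain ⟨_, _, _, h4⟩ := hrest
      rw [Bool.eq_iff_iff]; simp; omega
    | some false =>
      obtain ⟨_, _, _, h4⟩ := hrest
      rw [Bool.eq_iff_iff]; simp; omega
  | cons bit rest ih =>
    intro prev run mz mo z o hinv
    obtain ⟨hmz, hmo, hrest⟩ := hinv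
    simp only [List.foldl_cons, pvAltGo, pvStepA]
    by_cases hb : (bit == "0") = true
    · rw [hb]
      match prev with
      | some true =>
        obtain ⟨hz, ho, hr1, hr2⟩ := hrest
        rw [if_pos (show ((some true == some true) = true) from rfl),
            if_pos (show (true = true) from rfl)]
        simp only [hz]
        rw [ih (some true) (run + 1) _ mo (run + 1) 0
              ⟨by split_ifs <;> omega, hmo, rfl, rfl, by omega, by split_ifs <;> omega⟩]
        rw [Bool.eq_iff_iff]
        cases hX : pvAltGo (some true) (run + 1) rest
        · simp
        · have := pvAltGo_big rest (some true) (run + 1)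
          have hr36 : ¬ 36 < run + 1 := fun hc => by rw [this hc] at hX; exact Bool.false_ne_true hX
          simp; omega
      | none =>
        obtain ⟨hr, hz, ho⟩ := hrest
        rw [if_neg (show ¬((none == some true) = true) from by decide),
            if_pos (show (true = true) from rfl)]
        simp only [hr, hz]
        rw [if_neg (by omega : ¬((0:Int) > 36))]
        rw [ih (some true) 1 _ mo (0 + 1) 0
            ⟨by split_ifs <;> omega, hmo, rfl, rfl, by omega, by split_ifs <;> omega⟩]
        rw [Bool.eq_iff_iff]
        cases hX : pvAltGo (some true) 1 rest <;> (simp; (try omega))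
      | some false =>
        obtain ⟨ho, hz, hr1, hr2⟩ := hrest
        rw [if_neg (show ¬((some false == some true) = true) from by decide),
            if_pos (show (true = true) from rfl)]
        simp only [hz]
        by_cases hbig : 36 < run
        · rw [if_pos hbig]
          rw [Bool.eq_iff_iff]; simp
          have hm := pvMono rest (if mz < 1 then 1 else mz) mo 1 0
          omega
        · rw [if_neg hbig]
          rw [ih (some true) 1 _ mo (0 + 1) 0
              ⟨by split_ifs <;> omega, hmo, rfl, rfl, by omega, by split_ifs <;> omega⟩]
          rw [Bool.eq_iff_iff]
          cases hX : pvAltGo (some true) 1 rest <;> (simp; (try omega))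
    · rw [Bool.not_eq_true] at hb
      rw [hb]
      match prev with
      | some false =>
        obtain ⟨ho, hz, hr1, hr2⟩ := hrest
        rw [if_pos (show ((some false == some false) = true) from rfl),
            if_neg (show ¬(false = true) from by decide)]
        simp only [ho]
        rw [ih (some false) (run + 1) mz _ 0 (run + 1)
              ⟨hmz, by split_ifs <;> omega, rfl, rfl, by omega, by split_ifs <;> omega⟩]
        rw [Bool.eq_iff_iff]
        cases hX : pvAltGo (some false) (run + 1) rest
        · simp
        · have := pvAltGo_big rest (some false) (run + 1)
          have hr36 : ¬ 36 < run + 1 := fun hc => by rw [this hc] at hX; exact Bool.false_ne_true hX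
          simp; omega
      | none =>
        obtain ⟨hr, hz, ho⟩ := hrest
        rw [if_neg (show ¬((none == some false) = true) from by decide),
            if_neg (show ¬(false = true) from by decide)]
        simp only [hr, ho]
        rw [if_neg (by omega : ¬((0:Int) > 36))]
        rw [ih (some false) 1 mz _ 0 (0 + 1)
            ⟨hmz, by split_ifs <;> omega, rfl, rfl, by omega, by split_ifs <;> omega⟩]
        rw [Bool.eq_iff_iff]
        cases hX : pvAltGo (some false) 1 rest <;> (simp; (try omega))
      | some true =>
        obtain ⟨hz, ho, hr1, hr2⟩ := hrest
        rw [if_neg (show ¬((some true == some false) = true) from by decide),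
            if_neg (show ¬(false = true) from by decide)]
        simp only [ho]
        by_cases hbig : 36 < run
        · rw [if_pos hbig]
          rw [Bool.eq_iff_iff]; simp
          have hm := pvMono rest mz (if mo < 1 then 1 else mo) 0 1
          omega
        · rw [if_neg hbig]
          rw [ih (some false) 1 mz _ 0 (0 + 1)
              ⟨hmz, by split_ifs <;> omega, rfl, rfl, by omega, by split_ifs <;> omega⟩]
          rw [Bool.eq_iff_iff]
          cases hX : pvAltGo (some false) 1 rest <;> (simp; (try omega))

-- length of the leading block of key k
def pvLead (k : Bool) : List String → Nat
  | [] => 0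
  | b :: rest => if (b == "0") == k then pvLead k rest + 1 else 0

-- some position starts a run of more than 36 equal-keyed bits
def pvHasLong : List String → Bool
  | [] => false
  | b :: rest => (decide (36 ≤ pvLead (b == "0") rest)) || pvHasLong rest

theorem pvLead_char (l : List String) : ∀ (k : Bool) (m : Nat),
    m ≤ pvLead k l ↔ m ≤ l.length ∧ ∀ j, j < m → ((l.getD j "" == "0") = k) := by
  induction l with
  | nil =>
    intro k m
    constructor
    · intro h; exact ⟨h, fun j hj => absurd hj (by simp [pvLead] at h; omega)⟩
    · rintro ⟨h, _⟩; exact h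
  | cons b rest ih =>
    intro k m
    simp only [pvLead]
    by_cases hb : ((b == "0") == k) = true
    · rw [if_pos hb]
      cases m with
      | zero => simp
      | succ m' =>
        constructor
        · intro h
          have := (ih k m').mp (by omega)
          refine ⟨by simpa using Nat.succ_le_succ this.1, ?_⟩
          intro j hj
          cases j with
          | zero => simpa using hb
          | succ j' => simpa using this.2 j' (by omega)
        · intro ⟨h1, h2⟩
          have : m' ≤ pvLead k rest := (ih k m').mpr
            ⟨by simpa using Nat.lt_succ_iff.mp (Nat.lt_of_succ_le h1), fun j hj => by
              simpa using h2 (j+1) (by omega)⟩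
          omega
    · rw [if_neg hb]
      cases m with
      | zero => simp
      | succ m' =>
        constructor
        · intro h; omega
        · intro ⟨h1, h2⟩
          exact absurd (by simpa using h2 0 (by omega)) (by simpa using hb)

theorem pvHasLong_iff (l : List String) :
    pvHasLong l = true ↔ ∃ i, i < l.length ∧ 36 ≤ pvLead (l.getD i "" == "0") (l.drop (i+1)) := by
  induction l with
  | nil => simp [pvHasLong]
  | cons b rest ih =>
    simp only [pvHasLong, Bool.or_eq_true, decide_eq_true_eq, ih]
    constructor
    · rintro (h | ⟨i, hi, h⟩)
      · exact ⟨0, by simp, by simpa using h⟩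
      · exact ⟨i + 1, by simpa using Nat.succ_lt_succ hi, by simpa using h⟩
    · rintro ⟨i, hi, h⟩
      cases i with
      | zero => exact Or.inl (by simpa using h)
      | succ i' => exact Or.inr ⟨i', by simpa using Nat.lt_of_succ_lt_succ hi, by simpa using h⟩

theorem pvDrop_getD (l : List String) (a j : Nat) (h : a + j < l.length) :
    (l.drop a).getD j "" = l.getD (a + j) "" := by
  rw [List.getD_eq_getElem?_getD, List.getD_eq_getElem?_getD]
  rw [List.getElem?_drop]

-- the scan with a pending run equals "no merged long run and no long run ahead"
theorem pvAltGo_run (l : List String) : ∀ (k : Bool) (run : Int),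
    1 ≤ run → run ≤ 36 →
    pvAltGo (some k) run l = !(decide ((37:Int) ≤ run + (pvLead k l : Int)) || pvHasLong l) := by
  induction l with
  | nil =>
    intro k run h1 h2
    simp only [pvAltGo, pvLead, pvHasLong, Nat.cast_zero, Bool.or_false]
    rw [Bool.eq_iff_iff]; simp; omega
  | cons b rest ih =>
    intro k run h1 h2
    simp only [pvAltGo, pvLead, pvHasLong]
    by_cases hb : ((b == "0") == k) = true
    · have hk : (b == "0") = k := by simpa using hb
      subst hk
      simp only [beq_self_eq_true, if_true]
      by_cases hbig : run + 1 ≤ 36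
      · rw [ih (b == "0") (run + 1) (by omega) hbig]
        congr 1
        rw [Bool.eq_iff_iff]
        simp only [Bool.or_eq_true, decide_eq_true_eq]
        constructor
        · rintro (h | h)
          · exact Or.inl (by push_cast at h ⊢; omega)
          · exact Or.inr (Or.inr h)
        · rintro (h | h | h)
          · exact Or.inl (by omega)
          · exact Or.inl (by omega)
          · exact Or.inr h
      · rw [pvAltGo_big rest (some (b == "0")) (run + 1) (by omega)]
        have h37 : (37:Int) ≤ run + ((pvLead (b == "0") rest : Int) + 1) := by omega
        simp [h37]
    · have hk : ¬ ((b == "0") = k) := by simpa using hb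
      have e1 : ¬ ((some k == some (b == "0")) = true) := by
        simp only [beq_iff_eq, Option.some.injEq]
        intro h; exact hk h.symm
      rw [if_neg e1, if_neg (by omega : ¬ run > 36)]
      rw [ih (b == "0") 1 (by omega) (by omega)]
      congr 1
      rw [Bool.eq_iff_iff]
      simp only [Bool.or_eq_true, decide_eq_true_eq, hb, Bool.false_eq_true, if_false]
      constructor
      · rintro (h | h)
        · exact Or.inr (Or.inl (by omega))
        · exact Or.inr (Or.inr h)
      · rintro (h | h | h)
        · exfalso; omega
        · exact Or.inl (by omega)
        · exact Or.inr h

theorem pvAltGo_none (l : List String) : pvAltGo none 0 l = !pvHasLong l := by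
  cases l with
  | nil => simp [pvAltGo, pvHasLong]
  | cons b rest =>
    simp only [pvAltGo, pvHasLong]
    rw [if_neg (by simp), if_neg (by omega : ¬ (0:Int) > 36)]
    rw [pvAltGo_run rest (b == "0") 1 (by omega) (by omega)]
    congr 1
    rw [Bool.eq_iff_iff]
    simp only [Bool.or_eq_true, decide_eq_true_eq]
    constructor
    · rintro (h | h)
      · left; omega
      · right; exact h
    · rintro (h | h)
      · left; omega
      · right; exact h

-- B's window check computes pvHasLong
theorem pvAlt_eq (l : List String) : max_series_length_test_alt l = !pvHasLong l := by
  show (!((List.range (l.length - 36)).any fun i =>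
      (List.range' 1 36).all fun j =>
        ((l.getD (i + j) "" == "0") == (l.getD i "" == "0")))) = !pvHasLong l
  congr 1
  rw [Bool.eq_iff_iff, List.any_eq_true, pvHasLong_iff]
  constructor
  · rintro ⟨i, hmem, hall⟩
    rw [List.mem_range] at hmem
    have hn : i + 37 ≤ l.length := by omega
    refine ⟨i, by omega, ?_⟩
    rw [pvLead_char]
    refine ⟨by simp; omega, ?_⟩
    intro j hj
    rw [pvDrop_getD l (i+1) j (by omega)]
    rw [List.all_eq_true] at hall
    have := hall (j + 1) (by rw [List.mem_range'_1]; omega)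
    have : ((l.getD (i + (j + 1)) "" == "0") = (l.getD i "" == "0")) := by simpa using this
    rw [show i + 1 + j = i + (j + 1) by omega, this]
  · rintro ⟨i, hi, h⟩
    rw [pvLead_char] at h
    obtain ⟨hlen, hall⟩ := h
    have hn : i + 37 ≤ l.length := by simp at hlen; omega
    refine ⟨i, by rw [List.mem_range]; omega, ?_⟩
    rw [List.all_eq_true]
    intro j hj
    rw [List.mem_range'_1] at hj
    have := hall (j - 1) (by omega)
    rw [pvDrop_getD l (i+1) (j-1) (by omega)] at this
    rw [show i + 1 + (j - 1) = i + j by omega] at this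
    simpa using this

-- ===== VERDICT (by name: the statement is the Claim_ definition above) =====
theorem max_series_length_test_spec : Claim_equal_max_series_length_test := by
  intro sequence _
  unfold Spec_max_series_length_test max_series_length_test
  rw [pvAlt_eq, ← pvAltGo_none]
  have h := pvMain sequence none 0 0 0 0 0 ⟨le_refl 0, le_refl 0, rfl, rfl, rfl⟩
  simpa using h
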